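-- pv_equiv track=rewrite | github.com/cem5113/suc_tahmin | run_feature_analysis_fr.py | collapse_to_base_feature
-- ===== SOURCE A (Python) =====
-- from typing import List, Tuple, Dict, Optional, Sequence
--
-- def collapse_to_base_feature(feature_names_transformed: Sequence[str]) -> Dict[str, List[int]]:
--     """
--     “Taban sütun” → dönüştürülmüş indeks listesi.
--     - Sayısallar: kendi adı tek indeks.
--     - Kategorikler: 'col=val' ile başlayan tüm indeksler aynı tabana (col) gider.
--     """
--     mapping: Dict[str, List[int]] = {}
--     for i, nm in enumerate(feature_names_transformed):
--         if "=" in nm: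
--             base = nm.split("=", 1)[0]
--         else:
--             base = nm
--         mapping.setdefault(base, []).append(i)
--     return mapping
-- ===== SOURCE B (Python) =====
-- def collapse_to_base_feature(feature_names_transformed):
--     # Group-by-rescan: compute all base names once, then for each distinct base
--     # (first-occurrence order) collect its indices with a scan over the bases.
--     bases = [nm.split("=", 1)[0] if "=" in nm else nm for nm in feature_names_transformed]
--     return {b: [i for i, x in enumerate(bases) if x == b]
--             for b in dict.fromkeys(bases)}
-- ===== Notes on version B (the rewrite author's own statement) =====
-- stated objective: alternative
-- what changed: B replaces A's single-pass incremental setdefault-dict accumulation with a two-phase group-by-rescan: it first computes the list of base names, then builds the dict by mapping each distinct base (in first-occurrence order, via dict.fromkeys) to the indices found by scanning the base list.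
import Mathlib
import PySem

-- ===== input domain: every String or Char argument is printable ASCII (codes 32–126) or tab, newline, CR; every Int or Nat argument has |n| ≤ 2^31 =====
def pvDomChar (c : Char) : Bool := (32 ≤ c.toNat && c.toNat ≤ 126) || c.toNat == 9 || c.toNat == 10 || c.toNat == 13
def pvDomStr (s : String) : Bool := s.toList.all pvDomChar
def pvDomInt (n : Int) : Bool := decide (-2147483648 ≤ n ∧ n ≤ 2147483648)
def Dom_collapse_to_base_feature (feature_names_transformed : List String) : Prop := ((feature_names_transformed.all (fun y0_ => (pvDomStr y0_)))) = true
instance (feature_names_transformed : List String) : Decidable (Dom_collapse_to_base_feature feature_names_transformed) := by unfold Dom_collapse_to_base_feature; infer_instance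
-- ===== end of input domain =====

-- B replaces A's incremental setdefault-dict accumulation by a two-phase group-by-rescan
-- (compute all base names once, then collect each distinct base's indices by a scan);
-- objective: alternative decomposition, same results including key order.

-- ===== PORT A =====
-- base name: nm.split("=", 1)[0] if "=" in nm else nm  (split("=",1) always returns a
-- nonempty list since the separator is nonempty, hence getD []/headD "" are never hit)
def pyBase (nm : String) : String :=
  if PySem.Str.isIn "=" nm then (((PySem.Str.splitMax? nm "=" 1).getD []).headD "") else nm

-- mapping.setdefault(base, []).append(i) mutates mapping[base] to mapping.get(base, []) + [i],
-- which is exactly PySem.Dict.modify base [] (· ++ [i])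
def collapse_to_base_feature (feature_names_transformed : List String) : List (String × List Int) :=
  ((PySem.List.enumerate feature_names_transformed 0).foldl
    (fun mapping p => mapping.modify (pyBase p.2) [] (fun cur => cur ++ [p.1]))
    PySem.Dict.empty).items

-- ===== PORT B =====
def collapse_to_base_feature_alt (feature_names_transformed : List String) : List (String × List Int) :=
  let bases := feature_names_transformed.map pyBase
  (PySem.List.dedup bases).map (fun b =>
    (b, ((PySem.List.enumerate bases 0).filter (fun p => p.2 == b)).map (fun p => p.1)))

-- ===== PRECONDITION & SPEC =====
def Spec_collapse_to_base_feature (feature_names_transformed : List String) (out : List (String × List Int)) : Prop := out = collapse_to_base_feature_alt feature_names_transformed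
instance (feature_names_transformed : List String) (out : List (String × List Int)) : Decidable (Spec_collapse_to_base_feature feature_names_transformed out) := by unfold Spec_collapse_to_base_feature; infer_instance

-- ===== CLAIM (what is proved, stated in full; the proofs are below) =====
def Claim_equal_collapse_to_base_feature : Prop := ∀ (feature_names_transformed : List String), Dom_collapse_to_base_feature feature_names_transformed → Spec_collapse_to_base_feature feature_names_transformed (collapse_to_base_feature feature_names_transformed)

-- ===== LEMMAS AND PROOFS =====

-- the group-by view of the grouping fold: the dict built by  for (k, x): d.modify k [] (· ++ [x])
-- lists, in first-occurrence key order, each key with all its values in order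
theorem groupFold {κ : Type} [BEq κ] [LawfulBEq κ] (qs : List (κ × Int)) :
    (qs.foldl (fun d q => d.modify q.1 [] (fun cur => cur ++ [q.2])) PySem.Dict.empty).items
    = (PySem.List.dedup (qs.map (fun q => q.1))).map
        (fun b => (b, (qs.filter (fun q => q.1 == b)).map (fun q => q.2))) := by
  induction qs using List.reverseRecOn with
  | nil => rfl
  | append_singleton qs q ih =>
    have hget := PySem.Dict.getD_foldl_modify_append qs
      (PySem.Dict.empty (κ := κ) (ν := List Int)) q.1
    rw [List.foldl_append, List.foldl_cons, List.foldl_nil]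
    set D := qs.foldl (fun d q => d.modify q.1 [] (fun cur => cur ++ [q.2])) PySem.Dict.empty with hD
    have hDmk : D = PySem.Dict.mk ((PySem.List.dedup (qs.map (fun q => q.1))).map
        (fun b => (b, (qs.filter (fun q => q.1 == b)).map (fun q => q.2)))) := by
      rw [← ih]
    simp only [PySem.Dict.modify]
    rw [hget, hDmk]
    simp only [PySem.Dict.insert, PySem.Dict.contains, PySem.Dict.getD, PySem.Dict.get?,
      List.any_map, List.map_append, List.filter_append, List.map_cons, List.map_nil,
      Function.comp_def, PySem.Dict.empty, List.find?_nil, Option.map_none, Option.getD_none,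
      List.nil_append]
    have hded : PySem.List.dedup (List.map (fun q => q.1) qs ++ [q.1])
        = PySem.Set.add (PySem.List.dedup (List.map (fun q => q.1) qs)) q.1 := by
      simp [PySem.List.dedup, PySem.Set.ofList, List.foldl_append]
    rw [hded]
    by_cases hq : q.1 ∈ PySem.List.dedup (List.map (fun q => q.1) qs)
    · have hq' : q.1 ∈ List.map (fun q => q.1) qs := by
        rw [← PySem.List.mem_dedup]; exact hq
      have hany : (PySem.List.dedup (List.map (fun q => q.1) qs)).any (fun b => b == q.1) = true := by
        exact List.any_eq_true.mpr ⟨q.1, hq, by simp⟩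
      have hadd : PySem.Set.add (PySem.List.dedup (List.map (fun q => q.1) qs)) q.1
          = PySem.List.dedup (List.map (fun q => q.1) qs) := by
        simp only [PySem.Set.add, PySem.Set.contains]
        obtain ⟨p, hp, he⟩ := List.mem_map.mp hq'
        simp only [List.contains_eq_mem]
        rw [if_pos (by simp only [decide_eq_true_eq]; exact hq)]
      rw [hany, hadd]
      simp only [List.map_map]
      apply List.map_congr_left
      intro b hb
      by_cases hbq : b = q.1
      · subst hbq
        simp
      · have : (q.1 == b) = false := by simp [Ne.symm hbq]
        simp [hbq, this]
    · have hany : (PySem.List.dedup (List.map (fun q => q.1) qs)).any (fun b => b == q.1) = false := by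
        simp only [List.any_eq_false]
        intro b hb
        simp only [beq_iff_eq]
        rintro rfl; exact hq hb
      have hadd : PySem.Set.add (PySem.List.dedup (List.map (fun q => q.1) qs)) q.1
          = PySem.List.dedup (List.map (fun q => q.1) qs) ++ [q.1] := by
        simp only [PySem.Set.add, PySem.Set.contains, List.contains_eq_mem]
        rw [if_neg (by simp only [decide_eq_true_eq]; exact hq)]
      rw [hany, hadd]
      simp only [Bool.false_eq_true, if_false, List.map_append, List.map_cons, List.map_nil]
      congr 1
      · apply List.map_congr_left
        intro b hb
        have hbq : ¬ (q.1 = b) := by rintro rfl; exact hq hb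
        simp [hbq]
      · simp

theorem enumerate_map {α β : Type} (f : α → β) (l : List α) (s : Int) :
    PySem.List.enumerate (l.map f) s = (PySem.List.enumerate l s).map (fun p => (p.1, f p.2)) := by
  induction l generalizing s with
  | nil => rfl
  | cons x t ih => simp [PySem.List.enumerate_cons, ih]

-- ===== VERDICT (by name: the statement is the Claim_ definition above) =====
theorem collapse_to_base_feature_spec : Claim_equal_collapse_to_base_feature := by
  intro l _
  unfold Spec_collapse_to_base_feature collapse_to_base_feature collapse_to_base_feature_alt
  rw [← List.foldl_map (f := fun p : Int × String => (pyBase p.2, p.1))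
      (g := fun (d : PySem.Dict String (List Int)) (q : String × Int) => d.modify q.1 [] (fun cur => cur ++ [q.2])),
    groupFold]
  have hfst : ((PySem.List.enumerate l 0).map (fun p : Int × String => (pyBase p.2, p.1))).map (fun q => q.1)
      = l.map pyBase := by
    rw [List.map_map]
    have : ((fun q : String × Int => q.1) ∘ fun p : Int × String => (pyBase p.2, p.1))
        = pyBase ∘ (fun p : Int × String => p.2) := rfl
    rw [this, ← List.map_map, PySem.List.map_snd_enumerate]
  rw [hfst]
  apply List.map_congr_left
  intro b _
  rw [enumerate_map]
  simp [List.filter_map, List.map_map, Function.comp_def]
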